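-- pv_equiv track=rewrite | github.com/CrystalisIthuru/AdventOfCode | 2015/day11.py | has_increasing_straight
-- ===== SOURCE A (Python) =====
-- def has_increasing_straight(password):
--
--     ascii_values = [ord(char) for char in password]
--
--     count = 1
--     prev = ascii_values[0]
--     for current in ascii_values[1:]:
--         if count == 3:
--             return True
--
--         if current == prev + 1:
--             count += 1
--         else:
--             count = 1
--
--         prev = current
--
--     return count >= 3
-- ===== SOURCE B (Python) =====
-- def has_increasing_straight(password):
--     ascii_values = [ord(char) for char in password]
--     return any(b == a + 1 and c == b + 1
--                for a, b, c in zip(ascii_values, ascii_values[1:], ascii_values[2:]))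
-- ===== Notes on version B (the rewrite author's own statement) =====
-- stated objective: simpler
-- what changed: Replaces the stateful running-counter loop with independent sliding-window triple checks (any over zip of the list with its two shifts).
import Mathlib
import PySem

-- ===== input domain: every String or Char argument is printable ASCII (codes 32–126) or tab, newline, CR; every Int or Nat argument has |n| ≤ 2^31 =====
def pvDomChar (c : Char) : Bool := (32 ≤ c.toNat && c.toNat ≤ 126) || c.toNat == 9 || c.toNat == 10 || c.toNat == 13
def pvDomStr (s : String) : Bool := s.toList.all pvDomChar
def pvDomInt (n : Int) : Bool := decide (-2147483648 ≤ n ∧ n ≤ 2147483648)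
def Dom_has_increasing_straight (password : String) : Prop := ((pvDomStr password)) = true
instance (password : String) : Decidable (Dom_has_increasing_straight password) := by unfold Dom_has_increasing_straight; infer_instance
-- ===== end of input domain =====

-- B replaces A's stateful running-counter loop by independent sliding-window triple
-- checks (any over the list zipped with its two shifts); objective: simpler.

-- ===== PORT A =====
-- A's for-loop with early return, over state (count, prev).
def pvLoopA (count : Int) (prev : Int) : List Int → Bool
  | [] => decide (count ≥ 3)
  | c :: rest =>
      if count == 3 then true
      else pvLoopA (if c == prev + 1 then count + 1 else 1) c rest

def has_increasing_straight (password : String) : Bool :=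
  let ascii_values := password.toList.map (fun ch => (ch.toNat : Int))
  match ascii_values with
  | [] => false          -- Python raises IndexError on ascii_values[0]; excluded by Pre_
  | prev :: rest => pvLoopA 1 prev rest

-- ===== PORT B =====
def has_increasing_straight_alt (password : String) : Bool :=
  let ascii_values := password.toList.map (fun ch => (ch.toNat : Int))
  (ascii_values.zip ((ascii_values.drop 1).zip (ascii_values.drop 2))).any
    (fun t => t.2.1 == t.1 + 1 && t.2.2 == t.2.1 + 1)

-- ===== PRECONDITION & SPEC =====
-- Pre_ excludes only the empty string, on which A raises IndexError.
def Pre_has_increasing_straight (password : String) : Prop := password.toList ≠ []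
instance (password : String) : Decidable (Pre_has_increasing_straight password) := by unfold Pre_has_increasing_straight; infer_instance
def pvWitness_has_increasing_straight : String := "abc"

def Spec_has_increasing_straight (password : String) (out : Bool) : Prop := out = has_increasing_straight_alt password
instance (password : String) (out : Bool) : Decidable (Spec_has_increasing_straight password out) := by unfold Spec_has_increasing_straight; infer_instance

-- ===== CLAIM (what is proved, stated in full; the proofs are below) =====
def Claim_equal_has_increasing_straight : Prop := ∀ (password : String), Dom_has_increasing_straight password → Pre_has_increasing_straight password → Spec_has_increasing_straight password (has_increasing_straight password)

-- ===== LEMMAS AND PROOFS =====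

-- B's core, as a function of the list of codes.
def pvWin (l : List Int) : Bool :=
  (l.zip ((l.drop 1).zip (l.drop 2))).any
    (fun t => t.2.1 == t.1 + 1 && t.2.2 == t.2.1 + 1)

lemma pvWin_one (a : Int) : pvWin [a] = false := rfl
lemma pvWin_two (a b : Int) : pvWin [a, b] = false := rfl
lemma pvWin_cons (a b c : Int) (r : List Int) :
    pvWin (a :: b :: c :: r) = ((b == a + 1 && c == b + 1) || pvWin (b :: c :: r)) := by
  simp [pvWin]

lemma pvLoopA_three (prev : Int) (l : List Int) : pvLoopA 3 prev l = true := by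
  cases l <;> simp [pvLoopA]

lemma pvLoopA_eq (l : List Int) : ∀ prev count, (count = 1 ∨ count = 2) →
    pvLoopA count prev l =
      ((count == 2 && (match l with | c :: _ => c == prev + 1 | [] => false)) || pvWin (prev :: l)) := by
  induction l with
  | nil =>
      intro prev count h
      rcases h with h | h <;> subst h <;> simp [pvLoopA, pvWin_one]
  | cons c rest ih =>
      intro prev count h
      have hc3 : (count == 3) = false := by rcases h with h | h <;> subst h <;> decide
      rw [pvLoopA, hc3]
      simp only [Bool.false_eq_true, if_false]
      by_cases hc : c = prev + 1
      · subst hc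
        rcases h with h | h <;> subst h
        · -- count = 1 → new count = 2
          have := ih (prev + 1) 2 (Or.inr rfl)
          simp only [if_pos (by simp : ((prev+1 : Int) == prev + 1) = true)] at *
          rw [show (1 + 1 : Int) = 2 by norm_num, this]
          cases rest with
          | nil => simp [pvWin_two, pvWin_one]
          | cons d r =>
              rw [pvWin_cons]
              simp
        · -- count = 2 → new count = 3
          rw [if_pos (by simp), show (2 + 1 : Int) = 3 by norm_num, pvLoopA_three]
          simp
      · have hcb : ((c == prev + 1) : Bool) = false := by simp [hc]
        rw [if_neg (by simpa using hc)]
        rw [ih c 1 (Or.inl rfl)]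
        cases rest with
        | nil => simp [pvWin_two, pvWin_one, hcb]
        | cons d r =>
            rw [pvWin_cons]
            simp [hcb]

-- ===== VERDICT (by name: the statement is the Claim_ definition above) =====
theorem has_increasing_straight_spec : Claim_equal_has_increasing_straight := by
  intro password _ hpre
  unfold Spec_has_increasing_straight has_increasing_straight has_increasing_straight_alt
  cases hl : password.toList with
  | nil => exact absurd hl hpre
  | cons ch rest =>
      simp only [List.map_cons]
      rw [pvLoopA_eq _ _ 1 (Or.inl rfl)]
      simp [pvWin]
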